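-- pv_equiv track=rewrite | github.com/pypi-data/pypi-mirror-336 | packages/meno/meno-1.3.5.tar.gz/meno-1.3.5/examples/advanced_bertopic_features.py | get_cloud_dataset
-- ===== SOURCE A (Python) =====
-- from typing import List, Dict, Optional, Union, Any, Tuple
--
-- def get_cloud_dataset(n_samples: int = 100) -> List[str]:
--     """Generate sample cloud computing-related documents."""
--     cloud_documents = [
--         "Cloud computing provides scalable resources for AI workloads",
--         "AWS offers a wide range of cloud services for businesses",
--         "Azure integrates well with Microsoft's enterprise ecosystem",
--         "Google Cloud Platform excels at machine learning services",
--         "Serverless architectures reduce operational complexity",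
--         "Kubernetes orchestrates containerized applications efficiently",
--         "Docker containers provide consistent development environments",
--         "Microservices architecture improves system modularity",
--         "DevOps practices streamline software delivery pipelines",
--         "Infrastructure as code automates resource provisioning",
--         "Auto-scaling adjusts resources based on demand",
--         "Cloud security requires specialized expertise",
--         "Multi-cloud strategies prevent vendor lock-in",
--         "Edge computing processes data near its source",
--         "Virtual machines provide isolated execution environments",
--     ]
--     # Expand dataset with variations
--     expanded_docs = []
--     for _ in range(max(1, n_samples // len(cloud_documents))):
--         for doc in cloud_documents:
--             expanded_docs.append(doc)
--             expanded_docs.append(doc + " in modern infrastructure.")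
--             expanded_docs.append("Companies find that " + doc.lower())
--
--     return expanded_docs[:n_samples]
-- ===== SOURCE B (Python) =====
-- from typing import List
--
-- def get_cloud_dataset(n_samples: int = 100) -> List[str]:
--     """Generate sample cloud computing-related documents."""
--     docs = [
--         "Cloud computing provides scalable resources for AI workloads",
--         "AWS offers a wide range of cloud services for businesses",
--         "Azure integrates well with Microsoft's enterprise ecosystem",
--         "Google Cloud Platform excels at machine learning services",
--         "Serverless architectures reduce operational complexity",
--         "Kubernetes orchestrates containerized applications efficiently",
--         "Docker containers provide consistent development environments",
--         "Microservices architecture improves system modularity",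
--         "DevOps practices streamline software delivery pipelines",
--         "Infrastructure as code automates resource provisioning",
--         "Auto-scaling adjusts resources based on demand",
--         "Cloud security requires specialized expertise",
--         "Multi-cloud strategies prevent vendor lock-in",
--         "Edge computing processes data near its source",
--         "Virtual machines provide isolated execution environments",
--     ]
--     # Closed-form indexing: element i of the output stream is variant (i % 3)
--     # of document (i // 3) % len(docs); no nested generation loop.
--     def variant(i: int) -> str:
--         doc = docs[(i // 3) % len(docs)]
--         r = i % 3
--         if r == 0:
--             return doc
--         if r == 1:
--             return doc + " in modern infrastructure."
--         return "Companies find that " + doc.lower()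
--
--     total = 3 * len(docs) * max(1, n_samples // len(docs))
--     return [variant(i) for i in range(total)][:n_samples]
-- ===== Notes on version B (the rewrite author's own statement) =====
-- stated objective: alternative
-- what changed: Instead of A's nested generation loop (outer repetition loop, inner loop appending three variations per document), B computes each output element directly by index arithmetic -- the remainder of the index picks the variation and the quotient picks the document -- in a single comprehension over the index range, then truncates.
import Mathlib
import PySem

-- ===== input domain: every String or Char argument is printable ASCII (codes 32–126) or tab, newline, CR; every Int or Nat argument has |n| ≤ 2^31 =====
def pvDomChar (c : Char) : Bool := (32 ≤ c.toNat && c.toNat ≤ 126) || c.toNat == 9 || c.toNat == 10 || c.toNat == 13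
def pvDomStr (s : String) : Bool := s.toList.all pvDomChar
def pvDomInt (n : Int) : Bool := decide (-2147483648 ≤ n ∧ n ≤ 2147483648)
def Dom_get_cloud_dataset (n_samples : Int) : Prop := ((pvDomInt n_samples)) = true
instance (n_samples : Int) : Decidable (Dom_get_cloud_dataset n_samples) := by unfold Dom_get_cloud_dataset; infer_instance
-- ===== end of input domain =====

-- B computes element i directly by index arithmetic (variant i%3 of document (i//3)%15) instead of A's nested generation loop; same return value.

-- shared literal from the Python sources (both A and B contain this same list literal)
def cloudDocuments : List String := [
  "Cloud computing provides scalable resources for AI workloads",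
  "AWS offers a wide range of cloud services for businesses",
  "Azure integrates well with Microsoft's enterprise ecosystem",
  "Google Cloud Platform excels at machine learning services",
  "Serverless architectures reduce operational complexity",
  "Kubernetes orchestrates containerized applications efficiently",
  "Docker containers provide consistent development environments",
  "Microservices architecture improves system modularity",
  "DevOps practices streamline software delivery pipelines",
  "Infrastructure as code automates resource provisioning",
  "Auto-scaling adjusts resources based on demand",
  "Cloud security requires specialized expertise",
  "Multi-cloud strategies prevent vendor lock-in",
  "Edge computing processes data near its source",
  "Virtual machines provide isolated execution environments"]

-- ===== PORT A =====
-- nested loop: for _ in range(max(1, n // 15)): for doc in docs: append three variations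
def get_cloud_dataset (n_samples : Int) : List String :=
  let expanded_docs :=
    (PySem.List.pyRange 0 (max 1 (PySem.Int.floordiv n_samples 15)) 1).foldl
      (fun acc _ =>
        cloudDocuments.foldl
          (fun acc doc =>
            ((acc ++ [doc]) ++ [doc ++ " in modern infrastructure."]) ++
              ["Companies find that " ++ PySem.Str.lower doc])
          acc)
      []
  PySem.List.slice expanded_docs none (some n_samples)

-- ===== PORT B =====
-- B's helper `variant(i)`: docs[(i//3) % 15] is always in range for the i ≥ 0 B feeds it,
-- so the indexing is ported with the total pyGetD (exact there)
def cloudVariant (i : Int) : String :=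
  let doc := PySem.List.pyGetD cloudDocuments (PySem.Int.mod (PySem.Int.floordiv i 3) 15) ""
  let r := PySem.Int.mod i 3
  if r = 0 then doc
  else if r = 1 then doc ++ " in modern infrastructure."
  else "Companies find that " ++ PySem.Str.lower doc

-- closed-form indexing: [variant(i) for i in range(total)][:n_samples]
def get_cloud_dataset_alt (n_samples : Int) : List String :=
  let total := 3 * 15 * max 1 (PySem.Int.floordiv n_samples 15)
  PySem.List.slice ((PySem.List.pyRange 0 total 1).map cloudVariant) none (some n_samples)

-- ===== PRECONDITION & SPEC =====
def Spec_get_cloud_dataset (n_samples : Int) (out : List String) : Prop := out = get_cloud_dataset_alt n_samples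
instance (n_samples : Int) (out : List String) : Decidable (Spec_get_cloud_dataset n_samples out) := by unfold Spec_get_cloud_dataset; infer_instance

-- ===== CLAIM =====
def Claim_equal_get_cloud_dataset : Prop := ∀ (n_samples : Int), Dom_get_cloud_dataset n_samples → Spec_get_cloud_dataset n_samples (get_cloud_dataset n_samples)

-- ===== LEMMAS AND PROOFS =====

-- the 45-element block one outer iteration of A appends
def blockList : List String :=
  cloudDocuments.flatMap
    (fun doc => [doc, doc ++ " in modern infrastructure.",
                 "Companies find that " ++ PySem.Str.lower doc])

-- A's inner loop over the concrete document list appends exactly blockList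
theorem inner_fold_eq_block (acc : List String) :
    cloudDocuments.foldl
      (fun acc doc =>
        ((acc ++ [doc]) ++ [doc ++ " in modern infrastructure."]) ++
          ["Companies find that " ++ PySem.Str.lower doc])
      acc
    = acc ++ blockList := by
  simp [cloudDocuments, blockList, List.foldl, List.flatMap]

-- folding "append blockList" over any list yields length-many copies of blockList
theorem fold_append_eq_replicate {α β : Type} (B : List β) :
    ∀ (l : List α) (acc : List β),
      l.foldl (fun a _ => a ++ B) acc = acc ++ (List.replicate l.length B).flatten := by
  intro l
  induction l with
  | nil => intro acc; simp
  | cons x xs ih => intro acc; simp [List.foldl, ih, List.replicate, List.append_assoc]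

-- B's variant is periodic with period 45
theorem cloudVariant_shift (j : Int) : cloudVariant (45 + j) = cloudVariant j := by
  unfold cloudVariant
  have h1 : PySem.Int.mod (45 + j) 3 = PySem.Int.mod j 3 := by
    simp only [PySem.Int.mod_eq_emod_of_pos (show (0:Int) < 3 by omega)]
    omega
  have h2 : PySem.Int.mod (PySem.Int.floordiv (45 + j) 3) 15
      = PySem.Int.mod (PySem.Int.floordiv j 3) 15 := by
    simp only [PySem.Int.floordiv_eq_ediv_of_pos (show (0:Int) < 3 by omega),
        PySem.Int.mod_eq_emod_of_pos (show (0:Int) < 15 by omega)]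
    omega
  rw [h1, h2]

-- mapping the variant function over range(45*k) yields k copies of blockList
theorem map_variant_range (k : Nat) :
    (PySem.List.pyRange 0 (45 * (k : Int)) 1).map cloudVariant
      = (List.replicate k blockList).flatten := by
  induction k with
  | zero => simp [PySem.List.pyRange_one_eq_nil]
  | succ m ih =>
    have hsplit : PySem.List.pyRange 0 (45 * ((m + 1 : Nat) : Int)) 1
        = PySem.List.pyRange 0 45 1 ++ PySem.List.pyRange 45 (45 * ((m + 1 : Nat) : Int)) 1 := by
      apply PySem.List.pyRange_one_append 0 45 _ (by omega) (by push_cast; omega)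
    have hshift : PySem.List.pyRange 45 (45 * ((m + 1 : Nat) : Int)) 1
        = (PySem.List.pyRange 0 (45 * (m : Int)) 1).map (fun j => 45 + j) := by
      rw [PySem.List.pyRange_one, PySem.List.pyRange_one]
      have : (45 * ((m + 1 : Nat) : Int) - 45).toNat = (45 * (m : Int) - 0).toNat := by
        push_cast; omega
      rw [this]
      simp [List.map_map, Function.comp]
    rw [hsplit, List.map_append, hshift, List.map_map]
    have hmap : (PySem.List.pyRange 0 (45 * (m : Int)) 1).map (cloudVariant ∘ fun j => 45 + j)
        = (PySem.List.pyRange 0 (45 * (m : Int)) 1).map cloudVariant := by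
      apply List.map_congr_left
      intro x _
      exact cloudVariant_shift x
    rw [hmap, ih]
    have hfirst : (PySem.List.pyRange 0 45 1).map cloudVariant = blockList := by decide
    rw [hfirst]
    simp [List.replicate_succ]

-- ===== VERDICT =====
theorem get_cloud_dataset_spec : Claim_equal_get_cloud_dataset := by
  unfold Claim_equal_get_cloud_dataset
  intro n _
  unfold Spec_get_cloud_dataset get_cloud_dataset get_cloud_dataset_alt
  dsimp only
  have hfun :
      (fun (acc : List String) (_ : Int) =>
        cloudDocuments.foldl
          (fun acc doc =>
            ((acc ++ [doc]) ++ [doc ++ " in modern infrastructure."]) ++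
              ["Companies find that " ++ PySem.Str.lower doc])
          acc)
      = (fun acc _ => acc ++ blockList) := by
    funext acc _; exact inner_fold_eq_block acc
  rw [hfun, fold_append_eq_replicate]
  set r : Int := max 1 (PySem.Int.floordiv n 15) with hr
  have hrpos : 0 ≤ r := le_trans (by omega) (le_max_left _ _)
  have hcast : (3 : Int) * 15 * r = 45 * ((r.toNat : Nat) : Int) := by
    rw [Int.toNat_of_nonneg hrpos]; ring
  rw [hcast, map_variant_range r.toNat]
  simp [PySem.List.length_pyRange_one, hr]
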